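-- pv_equiv track=rewrite | github.com/tmprajwal/nilsson | hamiltonian.py | enumerate_states
-- ===== SOURCE A (Python) =====
-- def enumerate_states(space):
--   """
--   Returns a hash whose keys are 4-tuples containing Nilsson quantum numbers, and whose values are indices 0, 1, ...
--   """
--   n_max,omega,parity = space
--   # Integer spins are represented as themselves. Half-integer spins are represented by 2 times themselves.
--   # parity = 0 for even parity, 1 for odd
--   # omega = 2*Omega, should be positive
--   index = {}
--   i = 0
--   for n in range(parity,n_max+1,2):
--     for l in range(0,n+1):
--       if (n-l)%2!=0: # parity
--         continue
--       for ml in range(-l,l+1): # m_l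
--         for ms in range(-1,1+1,2): # two times m_s
--           if 2*ml+ms==omega:
--             index[(n,l,ml,ms)] = i
--             i = i+1
--   return index
-- ===== SOURCE B (Python) =====
-- def enumerate_states(space):
--   """
--   Returns a hash whose keys are 4-tuples containing Nilsson quantum numbers, and whose values are indices 0, 1, ...
--   """
--   n_max, omega, parity = space
--   index = {}
--   if (omega - 1) % 2 != 0:  # omega even: 2*ml+ms is always odd, no state can match
--     return index
--   lo = (omega - 1) // 2   # the unique ml with 2*ml + 1 == omega  (ms = +1)
--   hi = (omega + 1) // 2   # the unique ml with 2*ml - 1 == omega  (ms = -1); hi = lo + 1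
--   i = 0
--   for n in range(parity, n_max + 1, 2):
--     for l in range(n % 2, n + 1, 2):  # exactly the l of matching parity
--       if -l <= lo <= l:
--         index[(n, l, lo, 1)] = i
--         i += 1
--       if -l <= hi <= l:
--         index[(n, l, hi, -1)] = i
--         i += 1
--   return index
-- ===== Notes on version B (the rewrite author's own statement) =====
-- stated objective: alternative
-- what changed: Instead of scanning all (ml, ms) pairs per l, B solves 2*ml+ms==omega in closed form (ml=(omega-/+1)//2 for ms=+/-1, returning the empty dict immediately for even omega) and steps l directly over the matching parity, removing the two inner loops (O(n_max^2) instead of O(n_max^3) iterations, though a timing run could not confirm a speed-up at its largest sizes).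
import Mathlib
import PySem

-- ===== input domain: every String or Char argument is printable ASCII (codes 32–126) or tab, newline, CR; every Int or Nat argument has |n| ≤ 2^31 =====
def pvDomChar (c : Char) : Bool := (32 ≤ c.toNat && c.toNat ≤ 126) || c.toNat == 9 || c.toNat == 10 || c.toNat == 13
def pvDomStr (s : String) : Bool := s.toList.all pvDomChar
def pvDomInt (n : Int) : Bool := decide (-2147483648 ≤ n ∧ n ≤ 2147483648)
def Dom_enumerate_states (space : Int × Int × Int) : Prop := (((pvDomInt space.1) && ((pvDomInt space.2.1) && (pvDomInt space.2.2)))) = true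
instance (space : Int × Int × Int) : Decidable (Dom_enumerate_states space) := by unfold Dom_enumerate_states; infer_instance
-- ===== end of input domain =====

-- B removes A's inner (ml, ms) scan by solving 2*ml+ms==omega in closed form and steps l over the
-- matching parity only (an alternative with fewer loop levels). Return value only: the dict has
-- distinct keys, so it is the list of (n, l, ml, ms, index) entries in insertion order.

-- ===== PORT A =====
def enumerate_states (space : Int × Int × Int) : List (Int × Int × Int × Int × Int) :=
  let n_max := space.1
  let omega := space.2.1
  let parity := space.2.2
  -- index[(n,l,ml,ms)] = i : all keys are distinct, so dict insertion is list append
  let st := (PySem.List.pyRange parity (n_max + 1) 2).foldl (fun st n =>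
    (PySem.List.pyRange 0 (n + 1) 1).foldl (fun st l =>
      if PySem.Int.mod (n - l) 2 != 0 then st
      else
        (PySem.List.pyRange (-l) (l + 1) 1).foldl (fun st ml =>
          (PySem.List.pyRange (-1) (1 + 1) 2).foldl (fun st ms =>
            if 2 * ml + ms == omega then (st.1 ++ [(n, l, ml, ms, st.2)], st.2 + 1) else st) st) st) st)
    (([] : List (Int × Int × Int × Int × Int)), (0 : Int))
  st.1

-- ===== PORT B =====
def enumerate_states_alt (space : Int × Int × Int) : List (Int × Int × Int × Int × Int) :=
  let n_max := space.1
  let omega := space.2.1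
  let parity := space.2.2
  if PySem.Int.mod (omega - 1) 2 != 0 then []
  else
    let lo := PySem.Int.floordiv (omega - 1) 2
    let hi := PySem.Int.floordiv (omega + 1) 2
    let st := (PySem.List.pyRange parity (n_max + 1) 2).foldl (fun st n =>
      (PySem.List.pyRange (PySem.Int.mod n 2) (n + 1) 2).foldl (fun st l =>
        let st := if -l ≤ lo ∧ lo ≤ l then (st.1 ++ [(n, l, lo, 1, st.2)], st.2 + 1) else st
        if -l ≤ hi ∧ hi ≤ l then (st.1 ++ [(n, l, hi, -1, st.2)], st.2 + 1) else st) st)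
      (([] : List (Int × Int × Int × Int × Int)), (0 : Int))
    st.1

-- ===== PRECONDITION & SPEC =====
def Spec_enumerate_states (space : Int × Int × Int) (out : List (Int × Int × Int × Int × Int)) : Prop := out = enumerate_states_alt space
instance (space : Int × Int × Int) (out : List (Int × Int × Int × Int × Int)) : Decidable (Spec_enumerate_states space out) := by unfold Spec_enumerate_states; infer_instance

-- ===== CLAIM (what is proved, stated in full; the proofs are below) =====
def Claim_equal_enumerate_states : Prop := ∀ (space : Int × Int × Int), Dom_enumerate_states space → Spec_enumerate_states space (enumerate_states space)

-- ===== LEMMAS AND PROOFS =====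

-- the ms-loop: range(-1, 2, 2) is [-1, 1], and for odd omega = 2k+1 exactly ml = k+1 (with ms=-1) or ml = k (with ms=+1) matches
theorem msfold_eq (omega n l k ml : Int) (hk : omega = 2 * k + 1) (st : List (Int × Int × Int × Int × Int) × Int) :
    (PySem.List.pyRange (-1) (1 + 1) 2).foldl (fun st ms =>
        if 2 * ml + ms == omega then (st.1 ++ [(n, l, ml, ms, st.2)], st.2 + 1) else st) st
      = if ml = k + 1 then (st.1 ++ [(n, l, ml, -1, st.2)], st.2 + 1)
        else if ml = k then (st.1 ++ [(n, l, ml, 1, st.2)], st.2 + 1) else st := by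
  have h2 : PySem.List.pyRange (-1) (1 + 1) 2 = [-1, 1] := by decide
  rw [h2]
  simp only [List.foldl, beq_iff_eq]
  split_ifs <;> first | rfl | omega

-- the ml-loop over any range a..b-1, for odd omega = 2k+1: at most the entry for ml=k (ms=+1) then the one for ml=k+1 (ms=-1)
theorem mlfold_eq (omega n l k : Int) (hk : omega = 2 * k + 1) :
    ∀ (m : Nat) (a b : Int), (b - a).toNat = m → ∀ (st : List (Int × Int × Int × Int × Int) × Int),
    (PySem.List.pyRange a b 1).foldl (fun st ml =>
        (PySem.List.pyRange (-1) (1 + 1) 2).foldl (fun st ms =>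
          if 2 * ml + ms == omega then (st.1 ++ [(n, l, ml, ms, st.2)], st.2 + 1) else st) st) st
      = (let st1 := if a ≤ k ∧ k < b then (st.1 ++ [(n, l, k, 1, st.2)], st.2 + 1) else st;
         if a ≤ k + 1 ∧ k + 1 < b then (st1.1 ++ [(n, l, k + 1, -1, st1.2)], st1.2 + 1) else st1) := by
  intro m
  induction m with
  | zero =>
    intro a b h st
    rw [PySem.List.pyRange_one_eq_nil (by omega)]
    simp only [List.foldl]
    split_ifs <;> first | rfl | omega
  | succ m ih =>
    intro a b h st
    rw [PySem.List.pyRange_one_cons (by omega)]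
    simp only [List.foldl]
    rw [msfold_eq omega n l k a hk st, ih (a + 1) b (by omega)]
    by_cases h1 : a = k + 1
    · subst h1
      simp only
      split_ifs <;> first | rfl | omega
    · by_cases h2 : a = k
      · subst h2
        simp only
        split_ifs <;> first | rfl | omega
      · simp only
        split_ifs <;> first | rfl | omega

-- an empty and a cons form for a step-2 range
theorem pyRange_two_nil (a b : Int) (h : b ≤ a) : PySem.List.pyRange a b 2 = [] := by
  rw [PySem.List.pyRange_of_pos a b (by norm_num)]
  rw [if_neg (by omega)]
  simp

theorem pyRange_two_cons (a b : Int) (h : a < b) :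
    PySem.List.pyRange a b 2 = a :: PySem.List.pyRange (a + 2) b 2 := by
  rw [PySem.List.pyRange_of_pos a b (by norm_num), PySem.List.pyRange_of_pos (a + 2) b (by norm_num)]
  by_cases h2 : a + 2 < b
  · have hcnt : ((b - a + 2 - 1) / 2).toNat = ((b - (a + 2) + 2 - 1) / 2).toNat + 1 := by omega
    rw [if_pos h, if_pos h2, hcnt, List.range_succ_eq_map]
    simp only [List.map_cons, List.map_map, Nat.cast_zero, mul_zero, add_zero]
    refine congrArg₂ _ rfl ?_
    apply List.map_congr_left
    intro k _
    simp only [Function.comp]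
    push_cast
    ring
  · have hcnt : ((b - a + 2 - 1) / 2).toNat = 1 := by omega
    rw [if_pos h, if_neg h2, hcnt]
    simp

-- a step-2 range is the filter of the step-1 range by parity of (x - a)
theorem pyRange_two_eq_filter : ∀ (m : Nat) (a b : Int), (b - a).toNat ≤ m →
    PySem.List.pyRange a b 2 = (PySem.List.pyRange a b 1).filter (fun x => PySem.Int.mod (x - a) 2 == 0) := by
  intro m
  induction m with
  | zero =>
    intro a b h
    rw [pyRange_two_nil a b (by omega), PySem.List.pyRange_one_eq_nil (by omega)]
    rfl
  | succ m ih =>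
    intro a b h
    by_cases hab : a < b
    · rw [pyRange_two_cons a b hab, PySem.List.pyRange_one_cons hab]
      rw [List.filter_cons]
      have ha : (PySem.Int.mod (a - a) 2 == 0) = true := by
        simp
      rw [if_pos ha]
      congr 1
      by_cases hab2 : a + 1 < b
      · have e : a + 1 + 1 = a + 2 := by ring
        rw [PySem.List.pyRange_one_cons hab2, List.filter_cons, e]
        have ha1 : ¬ ((PySem.Int.mod (a + 1 - a) 2 == 0) = true) := by
          simp only [beq_iff_eq, PySem.Int.mod_eq_zero_iff_dvd]
          omega
        rw [if_neg ha1]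
        have hc : List.filter (fun x => PySem.Int.mod (x - a) 2 == 0) (PySem.List.pyRange (a + 2) b 1)
              = List.filter (fun x => PySem.Int.mod (x - (a + 2)) 2 == 0) (PySem.List.pyRange (a + 2) b 1) := by
          apply List.filter_congr
          intro x hx
          have hb : PySem.Int.mod (x - a) 2 = 0 ↔ PySem.Int.mod (x - (a + 2)) 2 = 0 := by
            simp only [PySem.Int.mod_eq_zero_iff_dvd]
            omega
          rw [Bool.eq_iff_iff]
          simp only [beq_iff_eq]
          exact hb
        rw [hc]
        exact ih (a + 2) b (by omega)
      · rw [pyRange_two_nil (a + 2) b (by omega), PySem.List.pyRange_one_eq_nil (by omega)]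
        rfl
    · rw [pyRange_two_nil a b (by omega), PySem.List.pyRange_one_eq_nil (by omega)]
      rfl

-- the l-loop of A visits exactly the l of n's parity, i.e. B's range(n % 2, n + 1, 2)
theorem filter_parity (n : Int) :
    (PySem.List.pyRange 0 (n + 1) 1).filter (fun l => PySem.Int.mod (n - l) 2 == 0)
      = PySem.List.pyRange (PySem.Int.mod n 2) (n + 1) 2 := by
  have hdm := PySem.Int.floordiv_mul_add_mod n 2
  have hm2 := PySem.Int.mod_two_eq n
  by_cases hn : n + 1 ≤ 0
  · rw [PySem.List.pyRange_one_eq_nil (by omega), pyRange_two_nil _ _ (by omega)]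
    rfl
  · have hle : PySem.Int.mod n 2 ≤ n + 1 := by omega
    have h0 : (0 : Int) ≤ PySem.Int.mod n 2 := by omega
    rw [pyRange_two_eq_filter (n + 1 - PySem.Int.mod n 2).toNat _ _ (le_refl _)]
    rw [PySem.List.pyRange_one_append 0 (PySem.Int.mod n 2) (n + 1) h0 hle, List.filter_append]
    have h1 : (PySem.List.pyRange 0 (PySem.Int.mod n 2) 1).filter (fun l => PySem.Int.mod (n - l) 2 == 0) = [] := by
      rcases hm2 with hm | hm
      · rw [hm, PySem.List.pyRange_one_eq_nil (le_refl 0)]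
        rfl
      · rw [hm, PySem.List.pyRange_one_cons (by norm_num : (0 : Int) < 1),
            PySem.List.pyRange_one_eq_nil (by norm_num : (1 : Int) ≤ 0 + 1)]
        have hf : ¬ ((PySem.Int.mod (n - 0) 2 == 0) = true) := by
          simp only [beq_iff_eq, PySem.Int.mod_eq_zero_iff_dvd]
          omega
        rw [List.filter_cons, if_neg hf, List.filter_nil]
    rw [h1, List.nil_append]
    apply List.filter_congr
    intro x hx
    have hb : PySem.Int.mod (n - x) 2 = 0 ↔ PySem.Int.mod (x - PySem.Int.mod n 2) 2 = 0 := by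
      simp only [PySem.Int.mod_eq_zero_iff_dvd]
      omega
    rw [Bool.eq_iff_iff]
    simp only [beq_iff_eq]
    exact hb

-- the two ports agree
theorem ports_agree (space : Int × Int × Int) : enumerate_states space = enumerate_states_alt space := by
  obtain ⟨n_max, omega, parity⟩ := space
  unfold enumerate_states enumerate_states_alt
  simp only
  by_cases hodd : PySem.Int.mod (omega - 1) 2 = 0
  · -- omega odd: both sides really enumerate
    obtain ⟨t, ht⟩ := (PySem.Int.mod_eq_zero_iff_dvd (omega - 1) 2).mp hodd
    have hk : omega = 2 * t + 1 := by omega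
    have hlo : PySem.Int.floordiv (omega - 1) 2 = t := by
      rw [PySem.Int.floordiv_eq_iff_of_pos (by norm_num)]
      omega
    have hhi : PySem.Int.floordiv (omega + 1) 2 = t + 1 := by
      rw [PySem.Int.floordiv_eq_iff_of_pos (by norm_num)]
      omega
    rw [if_neg (by simp only [bne_iff_ne, ne_eq, not_not]; exact hodd)]
    simp only [hlo, hhi]
    refine congrArg Prod.fst ?_
    apply PySem.List.foldl_congr_mem
    intro acc n hn
    have e1 : ∀ (st : List (Int × Int × Int × Int × Int) × Int) (l : Int),
        (if PySem.Int.mod (n - l) 2 != 0 then st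
         else
          (PySem.List.pyRange (-l) (l + 1) 1).foldl (fun st ml =>
            (PySem.List.pyRange (-1) (1 + 1) 2).foldl (fun st ms =>
              if 2 * ml + ms == omega then (st.1 ++ [(n, l, ml, ms, st.2)], st.2 + 1) else st) st) st)
        = (if (PySem.Int.mod (n - l) 2 == 0) then
            (PySem.List.pyRange (-l) (l + 1) 1).foldl (fun st ml =>
              (PySem.List.pyRange (-1) (1 + 1) 2).foldl (fun st ms =>
                if 2 * ml + ms == omega then (st.1 ++ [(n, l, ml, ms, st.2)], st.2 + 1) else st) st) st
           else st) := by
      intro st l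
      by_cases hc : PySem.Int.mod (n - l) 2 = 0
      · rw [if_neg (by simp only [bne_iff_ne, ne_eq, not_not]; exact hc), if_pos (beq_iff_eq.mpr hc)]
      · rw [if_pos (bne_iff_ne.mpr hc), if_neg (by simp only [beq_iff_eq]; exact hc)]
    rw [PySem.List.foldl_congr_mem _ _ _ _ (fun acc2 l _ => e1 acc2 l)]
    rw [PySem.List.foldl_if_eq_foldl_filter, filter_parity n]
    apply PySem.List.foldl_congr_mem
    intro st l hl
    rw [mlfold_eq omega n l t hk (l + 1 - -l).toNat (-l) (l + 1) rfl st]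
    simp only
    split_ifs <;> first | rfl | omega
  · -- omega even: no (ml, ms) pair ever matches, both sides are empty
    rw [if_pos (bne_iff_ne.mpr hodd)]
    have hnd : ¬ ((2 : Int) ∣ omega - 1) := fun hd => hodd ((PySem.Int.mod_eq_zero_iff_dvd (omega - 1) 2).mpr hd)
    have hms : ∀ (n l ml : Int) (st : List (Int × Int × Int × Int × Int) × Int),
        (PySem.List.pyRange (-1) (1 + 1) 2).foldl (fun st ms =>
          if 2 * ml + ms == omega then (st.1 ++ [(n, l, ml, ms, st.2)], st.2 + 1) else st) st = st := by
      intro n l ml st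
      rw [show PySem.List.pyRange (-1) (1 + 1) 2 = [-1, 1] by decide]
      simp only [List.foldl, beq_iff_eq]
      split_ifs with h1 h2 <;> first | rfl | (exfalso; apply hnd; omega)
    have hml : ∀ (n l : Int) (st : List (Int × Int × Int × Int × Int) × Int),
        (PySem.List.pyRange (-l) (l + 1) 1).foldl (fun st ml =>
          (PySem.List.pyRange (-1) (1 + 1) 2).foldl (fun st ms =>
            if 2 * ml + ms == omega then (st.1 ++ [(n, l, ml, ms, st.2)], st.2 + 1) else st) st) st = st := by
      intro n l st
      rw [PySem.List.foldl_congr_mem _ _ (fun st _ => st) _ (fun acc x _ => hms n l x acc)]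
      exact List.foldl_fixed _
    have hlf : ∀ (n : Int) (st : List (Int × Int × Int × Int × Int) × Int),
        (PySem.List.pyRange 0 (n + 1) 1).foldl (fun st l =>
          if PySem.Int.mod (n - l) 2 != 0 then st
          else
            (PySem.List.pyRange (-l) (l + 1) 1).foldl (fun st ml =>
              (PySem.List.pyRange (-1) (1 + 1) 2).foldl (fun st ms =>
                if 2 * ml + ms == omega then (st.1 ++ [(n, l, ml, ms, st.2)], st.2 + 1) else st) st) st) st = st := by
      intro n st
      rw [PySem.List.foldl_congr_mem _ _ (fun st _ => st) _ ?_]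
      · exact List.foldl_fixed _
      · intro acc l _
        by_cases hc : PySem.Int.mod (n - l) 2 = 0
        · rw [if_neg (by simp only [bne_iff_ne, ne_eq, not_not]; exact hc)]
          exact hml n l acc
        · rw [if_pos (bne_iff_ne.mpr hc)]
    rw [PySem.List.foldl_congr_mem _ _ (fun st _ => st) _ (fun acc x _ => hlf x acc)]
    rw [List.foldl_fixed]

-- ===== VERDICT (by name: the statement is the Claim_ definition above) =====
theorem enumerate_states_spec : Claim_equal_enumerate_states := by
  intro space _
  unfold Spec_enumerate_states
  exact ports_agree space
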